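-- pv_equiv track=rewrite | github.com/weibin666/wb_algorithm | 0813_exam/demo1.py | minRows
-- ===== SOURCE A (Python) =====
-- def minRows(viewWidth: int, scrollNames: list) -> int:
--     # 先按词典序对卷轴名称排序
--     scrollNames.sort()
--     n = len(scrollNames)  # 卷轴总数
--     sz = [len(s) for s in scrollNames]  # 预先计算每个卷轴名称的长度，避免重复计算
--
--     # 定义检查函数：判断在给定行数 rows 下，是否能在 viewWidth 宽度限制内完成排版
--     def can_fit(rows: int) -> bool:
--         # 计算需要的列数，(n + rows - 1) // rows 是向上取整
--         cols = (n + rows - 1) // rows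
--
--         s = 0  # 用来记录所有列的总宽度（不含列间距）
--         # 按列分组，每列包含 rows 个（最后一列可能不足）
--         for i in range(0, n, rows):
--             # 找出当前列中最长的卷轴名的长度
--             s += max(sz[i:i+rows])
--         # 总宽度 = 列宽总和 + 列间距 (cols - 1) * 2
--         return s + (cols - 1) * 2 <= viewWidth
--     # 从 1 行开始枚举，直到 n 行（最多每行一个卷轴）
--     for rows in range(1, n + 1):
--         # 一旦找到第一个满足宽度要求的行数，立即返回
--         if can_fit(rows):
--             return rows
--     # 理论上不会执行到这里，但为了保险，返回 n（即每行一个）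
--     return n
-- ===== SOURCE B (Python) =====
-- def minRows(viewWidth: int, scrollNames: list) -> int:
--     # Sort in place (same observable side effect as the original).
--     scrollNames.sort()
--     n = len(scrollNames)
--     sz = [len(s) for s in scrollNames]
--     if n == 0:
--         return 0
--     # Sparse table: table[j][i] = max(sz[i : i + 2**j]), built once up front.
--     table = [sz]
--     k = 1
--     while 2 * k <= n:
--         prev = table[-1]
--         table.append([max(prev[i], prev[i + k]) for i in range(n - 2 * k + 1)])
--         k *= 2
--
--     def rmax(l: int, r: int) -> int:
--         # max(sz[l:r]) via two overlapping power-of-two blocks, 0 <= l < r <= n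
--         j = (r - l).bit_length() - 1
--         row = table[j]
--         return max(row[l], row[r - (1 << j)])
--
--     rows = 1
--     while rows <= n:
--         cols = (n + rows - 1) // rows
--         s = 0
--         for i in range(0, n, rows):
--             s += rmax(i, min(i + rows, n))
--         if s + (cols - 1) * 2 <= viewWidth:
--             return rows
--         rows += 1
--     return n
-- ===== Notes on version B (the rewrite author's own statement) =====
-- stated objective: alternative
-- what changed: Replaces the per-row-count slice-and-max rescans with a sparse table built once, so each block maximum is answered from two precomputed power-of-two blocks instead of rescanning the slice.
import Mathlib
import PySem

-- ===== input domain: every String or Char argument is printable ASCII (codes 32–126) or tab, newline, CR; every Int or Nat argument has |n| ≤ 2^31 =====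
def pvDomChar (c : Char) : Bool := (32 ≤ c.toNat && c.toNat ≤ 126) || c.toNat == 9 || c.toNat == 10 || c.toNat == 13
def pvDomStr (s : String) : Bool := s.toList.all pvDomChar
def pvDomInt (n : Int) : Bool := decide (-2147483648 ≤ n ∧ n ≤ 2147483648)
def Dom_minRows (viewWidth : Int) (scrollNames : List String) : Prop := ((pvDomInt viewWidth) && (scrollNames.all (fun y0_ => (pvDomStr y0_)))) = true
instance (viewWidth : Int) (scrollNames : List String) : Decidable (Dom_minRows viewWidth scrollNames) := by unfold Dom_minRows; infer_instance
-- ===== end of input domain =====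

-- B replaces A's per-row-count slice-and-max rescans with a sparse table built once, answering
-- each block maximum from two precomputed power-of-two blocks (an alternative algorithm).
-- Both Pythons sort scrollNames in place (same side effect); the equivalence proved here is
-- about the return value.

-- ===== PORT A =====
-- def can_fit(rows): cols = (n + rows - 1) // rows; s = sum of max(sz[i:i+rows]); ...
def pvCanFit (viewWidth : Int) (n : Nat) (sz : List Int) (rows : Int) : Bool :=
  let cols : Int := PySem.Int.floordiv ((n : Int) + rows - 1) rows
  let s : Int := (PySem.List.pyRange 0 (n : Int) rows).foldl
    (fun acc i =>
      acc + ((PySem.List.max? (PySem.List.slice sz (some i) (some (i + rows))) (fun x => x)).getD 0)) 0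
  decide (s + (cols - 1) * 2 ≤ viewWidth)

def minRows (viewWidth : Int) (scrollNames : List String) : Int :=
  let names := PySem.List.sorted scrollNames (fun s => s) false
  let n : Nat := names.length
  let sz : List Int := names.map (fun s => PySem.Str.len s)
  -- for rows in range(1, n + 1): if can_fit(rows): return rows
  match (PySem.List.pyRange 1 ((n : Nat) + 1) 1).find? (pvCanFit viewWidth n sz) with
  | some r => r
  | none => (n : Int)

-- ===== PORT B =====
-- table.append([max(prev[i], prev[i + k]) for i in range(n - 2 * k + 1)])
def pvCombine (n k : Nat) (prev : List Int) : List Int :=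
  (List.range (n - 2 * k + 1)).map (fun i => max (prev.getD i 0) (prev.getD (i + k) 0))

-- while 2 * k <= n: append the next level; k *= 2
def pvBuild (n k : Nat) (table : List (List Int)) : List (List Int) :=
  if _h : 0 < k ∧ 2 * k ≤ n then
    pvBuild n (2 * k) (table ++ [pvCombine n k (table.getLast?.getD [])])
  else table
termination_by n + 1 - k
decreasing_by omega

-- def rmax(l, r): j = (r-l).bit_length()-1; row = table[j]; return max(row[l], row[r-(1<<j)])
def pvRmax (table : List (List Int)) (l r : Nat) : Int :=
  let j : Nat := PySem.Int.bitLength ((r - l : Nat) : Int) - 1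
  let row := table.getD j []
  max (row.getD l 0) (row.getD (r - 2 ^ j) 0)

-- the body of B's 'while rows <= n' loop: cols, then one rmax per block
def pvCanFitAlt (viewWidth : Int) (n : Nat) (table : List (List Int)) (rows : Nat) : Bool :=
  let cols : Nat := (n + rows - 1) / rows
  let s : Int := (PySem.List.pyRange 0 (n : Int) (rows : Int)).foldl
    (fun acc i => acc + pvRmax table i.toNat (min (i.toNat + rows) n)) 0
  decide (s + ((cols : Int) - 1) * 2 ≤ viewWidth)

-- while rows <= n: ... ; rows += 1
def pvSearch (canFit : Nat → Bool) (n rows : Nat) : Int :=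
  if rows ≤ n then
    if canFit rows then (rows : Int) else pvSearch canFit n (rows + 1)
  else (n : Int)
termination_by n + 1 - rows

def minRows_alt (viewWidth : Int) (scrollNames : List String) : Int :=
  let names := PySem.List.sorted scrollNames (fun s => s) false
  let n : Nat := names.length
  let sz : List Int := names.map (fun s => PySem.Str.len s)
  if n = 0 then 0
  else pvSearch (pvCanFitAlt viewWidth n (pvBuild n 1 [sz])) n 1

-- ===== PRECONDITION & SPEC =====
def Spec_minRows (viewWidth : Int) (scrollNames : List String) (out : Int) : Prop := out = minRows_alt viewWidth scrollNames
instance (viewWidth : Int) (scrollNames : List String) (out : Int) : Decidable (Spec_minRows viewWidth scrollNames out) := by unfold Spec_minRows; infer_instance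

-- ===== CLAIM (what is proved, stated in full; the proofs are below) =====
def Claim_equal_minRows : Prop := ∀ (viewWidth : Int) (scrollNames : List String), Dom_minRows viewWidth scrollNames → Spec_minRows viewWidth scrollNames (minRows viewWidth scrollNames)

-- ===== LEMMAS AND PROOFS =====

-- pvMax sz l d = running max (with 0 as the base) of sz.getD over indices [l, l+d)
def pvMax (sz : List Int) (l : Nat) : Nat → Int
  | 0 => 0
  | d + 1 => max (pvMax sz l d) (sz.getD (l + d) 0)

-- pvLevel sz n p = the sparse-table level of span p
def pvLevel (sz : List Int) (n p : Nat) : List Int :=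
  (List.range (n - p + 1)).map (fun i => pvMax sz i p)

lemma pvGetD_nonneg (sz : List Int) (hnn : ∀ x ∈ sz, 0 ≤ x) (l : Nat) : 0 ≤ sz.getD l 0 := by
  cases h : sz[l]? with
  | none => simp [List.getD, h]
  | some x => simp [List.getD, h]; exact hnn x (List.mem_of_getElem? h)

lemma pvGetD_zero_of_le (sz : List Int) (l : Nat) (h : sz.length ≤ l) : sz.getD l 0 = 0 := by
  simp [List.getD, List.getElem?_eq_none (by omega : sz.length ≤ l)]

lemma pvMax_nonneg (sz : List Int) (l d : Nat) : 0 ≤ pvMax sz l d := by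
  induction d with
  | zero => simp [pvMax]
  | succ d ih => simp only [pvMax, le_max_iff]; left; exact ih

lemma pvMax_zero_of_le (sz : List Int) (l d : Nat) (h : sz.length ≤ l) : pvMax sz l d = 0 := by
  induction d with
  | zero => rfl
  | succ d ih =>
      simp only [pvMax, ih, pvGetD_zero_of_le sz (l + d) (by omega)]
      simp

lemma pvMax_append (sz : List Int) (l d₁ d₂ : Nat) :
    pvMax sz l (d₁ + d₂) = max (pvMax sz l d₁) (pvMax sz (l + d₁) d₂) := by
  induction d₂ with
  | zero =>
      simp only [Nat.add_zero, pvMax]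
      have := pvMax_nonneg sz l d₁
      omega
  | succ d ih =>
      have h : d₁ + (d + 1) = (d₁ + d) + 1 := by omega
      rw [h]
      simp only [pvMax, ih, max_assoc, Nat.add_assoc]

lemma pvMax_one (sz : List Int) (l : Nat) (hnn : ∀ x ∈ sz, 0 ≤ x) :
    pvMax sz l 1 = sz.getD l 0 := by
  have h := pvGetD_nonneg sz hnn l
  simp only [pvMax, Nat.add_zero]
  omega

lemma pvMax_front (sz : List Int) (l d : Nat) (hnn : ∀ x ∈ sz, 0 ≤ x) :
    pvMax sz l (d + 1) = max (sz.getD l 0) (pvMax sz (l + 1) d) := by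
  have h := pvMax_append sz l 1 d
  rw [Nat.add_comm 1 d] at h
  rw [h, pvMax_one sz l hnn]

lemma foldl_max_split (t : List Int) : ∀ a b : Int, t.foldl max (max a b) = max a (t.foldl max b) := by
  induction t with
  | nil => intro a b; rfl
  | cons x t ih =>
      intro a b
      simp only [List.foldl_cons]
      rw [max_assoc, ih]

lemma foldl_max_chunk (sz : List Int) (hnn : ∀ x ∈ sz, 0 ≤ x) :
    ∀ (d l : Nat), ((sz.drop l).take d).foldl max 0 = pvMax sz l d := by
  intro d
  induction d with
  | zero => intro l; rfl
  | succ d ih =>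
      intro l
      rcases lt_or_ge l sz.length with h | h
      · have hdrop : sz.drop l = sz[l] :: sz.drop (l + 1) := List.drop_eq_getElem_cons h
        rw [hdrop]
        simp only [List.take_succ_cons, List.foldl_cons]
        rw [show ((0 : Int) ⊔ sz[l]) = max sz[l] 0 from max_comm _ _, foldl_max_split, ih]
        rw [pvMax_front sz l d hnn, List.getD_eq_getElem sz 0 h]
      · simp [List.drop_eq_nil_of_le h, pvMax_zero_of_le sz l _ h]

lemma max?_chunk (sz : List Int) (hnn : ∀ x ∈ sz, 0 ≤ x) (l d : Nat)
    (hl : l < sz.length) :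
    (PySem.List.max? ((sz.drop l).take (d + 1)) (fun x => x)).getD 0 = pvMax sz l (d + 1) := by
  have hdrop : sz.drop l = sz[l] :: sz.drop (l + 1) := List.drop_eq_getElem_cons hl
  rw [hdrop, List.take_succ_cons, PySem.List.max?_id_cons]
  simp only [Option.getD_some]
  have hx : (0 : Int) ≤ sz[l] := hnn _ (List.getElem_mem _)
  rw [show sz[l] = max sz[l] 0 from (max_eq_left hx).symm, foldl_max_split,
    foldl_max_chunk sz hnn, pvMax_front sz l d hnn, List.getD_eq_getElem sz 0 hl]

lemma pvLevel_getD (sz : List Int) (n p j : Nat) (hj : j < n - p + 1) :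
    (pvLevel sz n p).getD j 0 = pvMax sz j p := by
  simp [pvLevel, List.getD, List.getElem?_map, List.getElem?_range hj]

lemma pvLevel_one (sz : List Int) (n : Nat) (hn : n = sz.length) (hn1 : 1 ≤ n)
    (hnn : ∀ x ∈ sz, 0 ≤ x) : pvLevel sz n 1 = sz := by
  have hlen : n - 1 + 1 = n := by omega
  apply List.ext_getElem
  · simp [pvLevel, hn ▸ hlen, hn]
  · intro i h1 h2
    simp only [pvLevel, hlen] at h1 ⊢
    simp only [List.getElem_map, List.getElem_range]
    rw [pvMax_one sz _ hnn, List.getD_eq_getElem sz 0 h2]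

lemma pvCombine_level (sz : List Int) (n k : Nat) (hn : n = sz.length)
    (hk : 1 ≤ k) (h2 : 2 * k ≤ n) :
    pvCombine n k (pvLevel sz n k) = pvLevel sz n (2 * k) := by
  show _ = (List.range (n - 2 * k + 1)).map (fun i => pvMax sz i (2 * k))
  unfold pvCombine
  apply List.map_congr_left
  intro i hi
  rw [List.mem_range] at hi
  show max ((pvLevel sz n k).getD i 0) ((pvLevel sz n k).getD (i + k) 0) = _
  rw [pvLevel_getD sz n k i (by omega), pvLevel_getD sz n k (i + k) (by omega)]
  rw [show 2 * k = k + k from by omega, pvMax_append sz i k k]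

lemma pvMax_mono (sz : List Int) (b q q' : Nat) (h : q ≤ q') :
    pvMax sz b q ≤ pvMax sz b q' := by
  have ha := pvMax_append sz b q (q' - q)
  rw [show q + (q' - q) = q' from by omega] at ha
  rw [ha]
  exact le_max_left _ _

lemma pvBuild_spec (sz : List Int) (n : Nat) (hn : n = sz.length) :
    ∀ (m k t : Nat) (table : List (List Int)), n + 1 - k = m → k = 2 ^ t →
      table.length = t + 1 →
      (∀ j, j ≤ t → table.getD j [] = pvLevel sz n (2 ^ j)) →
      ∀ j, 2 ^ j ≤ n → (pvBuild n k table).getD j [] = pvLevel sz n (2 ^ j) := by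
  intro m
  induction m using Nat.strong_induction_on with
  | _ m ih =>
    intro k t table hm hk hlen hcov j hj
    have hkpos : 0 < k := hk ▸ Nat.pow_pos (by norm_num)
    rw [pvBuild]
    split
    next h =>
      have hlast : table.getLast?.getD [] = pvLevel sz n (2 ^ t) := by
        have hget : table.getD t [] = pvLevel sz n (2 ^ t) := hcov t le_rfl
        rw [List.getLast?_eq_getElem?, hlen, Nat.add_sub_cancel]
        exact hget
      have hcomb : pvCombine n k (table.getLast?.getD []) = pvLevel sz n (2 ^ (t + 1)) := by
        rw [hlast, ← hk]
        rw [pvCombine_level sz n k hn (by omega) h.2]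
        rw [pow_succ, hk]
        ring_nf
      refine ih (n + 1 - 2 * k) (by omega) (2 * k) (t + 1) _ rfl (by rw [hk]; ring) ?_ ?_ j hj
      · simp [hlen]
      · intro j' hj'
        rcases Nat.lt_or_ge j' (t + 1) with hlt | hge
        · rw [List.getD_append _ _ _ _ (by omega)]
          exact hcov j' (by omega)
        · have hj'' : j' = t + 1 := by omega
          subst hj''
          rw [List.getD_eq_getElem?_getD, List.getElem?_append_right (by omega), hlen]
          simp [hcomb]
    next h =>
      have h2k : n < 2 * k := by omega
      have hjt : j ≤ t := by
        by_contra hc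
        have : t + 1 ≤ j := by omega
        have hle : 2 ^ (t + 1) ≤ 2 ^ j := Nat.pow_le_pow_right (by norm_num) this
        have : 2 ^ (t + 1) = 2 * k := by rw [pow_succ, hk]; ring
        omega
      exact hcov j hjt

lemma pvRmax_spec (sz : List Int) (n : Nat) (hn : n = sz.length) (hn1 : 1 ≤ n)
    (hnn : ∀ x ∈ sz, 0 ≤ x) (l r : Nat) (hlr : l < r) (hr : r ≤ n) :
    pvRmax (pvBuild n 1 [sz]) l r = pvMax sz l (r - l) := by
  have hd : 1 ≤ r - l := by omega
  have hne : ((r - l : Nat) : Int) ≠ 0 := by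
    simp only [ne_eq, Nat.cast_eq_zero]; omega
  have h1 : 2 ^ (PySem.Int.bitLength ((r - l : Nat) : Int) - 1) ≤ r - l := by
    have := PySem.Int.two_pow_bitLength_le ((r - l : Nat) : Int) hne
    simpa using this
  have hbl1 : 1 ≤ PySem.Int.bitLength ((r - l : Nat) : Int) := by
    by_contra hc
    have h0 : PySem.Int.bitLength ((r - l : Nat) : Int) = 0 := by omega
    have := PySem.Int.lt_two_pow_bitLength ((r - l : Nat) : Int)
    rw [h0] at this
    simp at this
    omega
  have h2 : r - l < 2 ^ (PySem.Int.bitLength ((r - l : Nat) : Int) - 1 + 1) := by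
    have := PySem.Int.lt_two_pow_bitLength ((r - l : Nat) : Int)
    rw [show PySem.Int.bitLength ((r - l : Nat) : Int) - 1 + 1
        = PySem.Int.bitLength ((r - l : Nat) : Int) from by omega]
    simpa using this
  have hcov : ∀ j, 2 ^ j ≤ n → (pvBuild n 1 [sz]).getD j [] = pvLevel sz n (2 ^ j) := by
    refine pvBuild_spec sz n hn n 1 0 [sz] (by omega) (by norm_num) rfl ?_
    intro j hj
    have : j = 0 := by omega
    subst this
    simpa using (pvLevel_one sz n hn hn1 hnn).symm
  set j := PySem.Int.bitLength ((r - l : Nat) : Int) - 1 with hjdef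
  set p := 2 ^ j with hpdef
  have hp1 : p ≤ r - l := h1
  have hp2 : r - l ≤ 2 * p := by
    have : (2 : Nat) ^ (j + 1) = 2 * p := by rw [hpdef, pow_succ]; ring
    omega
  have hpn : p ≤ n := by omega
  have htab : (pvBuild n 1 [sz]).getD j [] = pvLevel sz n p := hcov j hpn
  show max (((pvBuild n 1 [sz]).getD j []).getD l 0)
      (((pvBuild n 1 [sz]).getD j []).getD (r - p) 0) = pvMax sz l (r - l)
  rw [htab]
  rw [pvLevel_getD sz n p l (by omega), pvLevel_getD sz n p (r - p) (by omega)]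
  set b := r - p with hbdef
  have e1 : pvMax sz l (r - l) = max (pvMax sz l (b - l)) (pvMax sz b p) := by
    have := pvMax_append sz l (b - l) p
    rw [show (b - l) + p = r - l from by omega, show l + (b - l) = b from by omega] at this
    exact this
  have e2 : pvMax sz l p = max (pvMax sz l (b - l)) (pvMax sz b (p - (b - l))) := by
    have := pvMax_append sz l (b - l) (p - (b - l))
    rw [show (b - l) + (p - (b - l)) = p from by omega, show l + (b - l) = b from by omega] at this
    exact this
  have e3 : pvMax sz b (p - (b - l)) ≤ pvMax sz b p := pvMax_mono sz b _ _ (by omega)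
  omega

lemma pvMax_clamp (sz : List Int) (n l d : Nat) (hn : n = sz.length) (hl : l ≤ n) :
    pvMax sz l d = pvMax sz l (min (l + d) n - l) := by
  rcases Nat.lt_or_ge n (l + d) with h | h
  case inr =>
    rw [Nat.min_eq_left h]
    congr 1
    omega
  case inl =>
    rw [Nat.min_eq_right (by omega)]
    have ha := pvMax_append sz l (n - l) (d - (n - l))
    rw [show (n - l) + (d - (n - l)) = d from by omega,
        show l + (n - l) = n from by omega] at ha
    rw [ha, pvMax_zero_of_le sz n _ (by omega)]
    have := pvMax_nonneg sz l (n - l)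
    omega

lemma pvCanFit_eq (viewWidth : Int) (n : Nat) (sz : List Int) (hn : n = sz.length)
    (hn1 : 1 ≤ n) (hnn : ∀ x ∈ sz, 0 ≤ x) (rows : Nat) (h1 : 1 ≤ rows) :
    pvCanFit viewWidth n sz ((rows : Nat) : Int)
      = pvCanFitAlt viewWidth n (pvBuild n 1 [sz]) rows := by
  unfold pvCanFit pvCanFitAlt
  have hcols : PySem.Int.floordiv ((n : Int) + (rows : Int) - 1) (rows : Int)
      = (((n + rows - 1) / rows : Nat) : Int) := by
    rw [show ((n : Int) + (rows : Int) - 1) = ((n + rows - 1 : Nat) : Int) from by omega]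
    exact PySem.Int.floordiv_natCast _ _
  rw [hcols]
  have hsum : (PySem.List.pyRange 0 (n : Int) (rows : Int)).foldl
      (fun acc i =>
        acc + ((PySem.List.max? (PySem.List.slice sz (some i) (some (i + (rows : Int)))) (fun x => x)).getD 0)) 0
      = (PySem.List.pyRange 0 (n : Int) (rows : Int)).foldl
      (fun acc i => acc + pvRmax (pvBuild n 1 [sz]) i.toNat (min (i.toNat + rows) n)) 0 := by
    apply PySem.List.foldl_congr_mem
    intro acc i hi
    rw [PySem.List.mem_pyRange_iff_of_pos (by exact_mod_cast h1)] at hi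
    obtain ⟨hi0, hin, -⟩ := hi
    have hl : i.toNat < n := by omega
    have hicast : i = ((i.toNat : Nat) : Int) := by omega
    congr 1
    rw [hicast, show ((i.toNat : Nat) : Int) + (rows : Int) = ((i.toNat + rows : Nat) : Int) from by push_cast; omega]
    rw [PySem.List.slice_natCast sz i.toNat (i.toNat + rows),
        show i.toNat + rows - i.toNat = rows from by omega]
    obtain ⟨d, rfl⟩ : ∃ d, rows = d + 1 := ⟨rows - 1, by omega⟩
    rw [max?_chunk sz hnn i.toNat d (by omega)]
    simp only [Int.toNat_natCast]
    have hr1 : i.toNat < min (i.toNat + (d + 1)) n := by omega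
    have hr2 : min (i.toNat + (d + 1)) n ≤ n := by omega
    rw [pvRmax_spec sz n hn hn1 hnn i.toNat (min (i.toNat + (d + 1)) n) hr1 hr2]
    rw [← pvMax_clamp sz n i.toNat (d + 1) hn (by omega)]
  rw [hsum]

lemma pvSearch_eq (ca : Int → Bool) (cb : Nat → Bool) (n : Nat)
    (h : ∀ rows : Nat, 1 ≤ rows → rows ≤ n → ca ((rows : Nat) : Int) = cb rows) :
    ∀ (m rows : Nat), n + 1 - rows = m → 1 ≤ rows →
      (match (PySem.List.pyRange ((rows : Nat) : Int) (((n : Nat) : Int) + 1) 1).find? ca with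
       | some r => r
       | none => ((n : Nat) : Int)) = pvSearch cb n rows := by
  intro m
  induction m using Nat.strong_induction_on with
  | _ m ih =>
    intro rows hm h1
    rw [pvSearch]
    rcases Nat.lt_or_ge n rows with hgt | hle
    case inr =>
      rw [PySem.List.pyRange_one_cons (by exact_mod_cast Nat.lt_succ_of_le hle)]
      rw [if_pos hle]
      simp only [List.find?_cons]
      rw [h rows h1 hle]
      cases hc : cb rows with
      | true => simp
      | false =>
          simp only [Bool.false_eq_true, reduceIte]
          rw [show ((rows : Nat) : Int) + 1 = (((rows + 1 : Nat) : Nat) : Int) from by push_cast; ring]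
          exact ih (n + 1 - (rows + 1)) (by omega) (rows + 1) rfl (by omega)
    case inl =>
      rw [PySem.List.pyRange_one_eq_nil (by exact_mod_cast hgt)]
      rw [if_neg (by omega)]
      rfl

theorem minRows_spec' : ∀ (viewWidth : Int) (scrollNames : List String),
    minRows viewWidth scrollNames = minRows_alt viewWidth scrollNames := by
  intro w xs
  unfold minRows minRows_alt
  set names := PySem.List.sorted xs (fun s => s) false with hnames
  set n := names.length with hn
  set sz := names.map (fun s => PySem.Str.len s) with hsz
  have hlen : n = sz.length := by simp [hsz, hn]
  have hnn : ∀ x ∈ sz, 0 ≤ x := by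
    intro x hx
    rw [hsz] at hx
    obtain ⟨s, -, rfl⟩ := List.mem_map.mp hx
    rw [PySem.Str.len_eq]
    positivity
  show (match (PySem.List.pyRange 1 ((n : Int) + 1) 1).find? (pvCanFit w n sz) with
        | some r => r
        | none => ((n : Nat) : Int))
      = (if n = 0 then 0 else pvSearch (pvCanFitAlt w n (pvBuild n 1 [sz])) n 1)
  rcases Nat.eq_zero_or_pos n with h0 | h1
  · rw [if_pos h0, h0]
    rw [PySem.List.pyRange_one_eq_nil (by norm_num)]
    rfl
  · rw [if_neg (by omega)]
    have hfin := pvSearch_eq (pvCanFit w n sz) (pvCanFitAlt w n (pvBuild n 1 [sz])) n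
      (fun rows hr1 _ => pvCanFit_eq w n sz hlen h1 hnn rows hr1) (n + 1 - 1) 1 rfl (by omega)
    simpa using hfin
-- ===== VERDICT (by name: the statement is the Claim_ definition above) =====
theorem minRows_spec : Claim_equal_minRows := by
  intro viewWidth scrollNames _
  exact minRows_spec' viewWidth scrollNames
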